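-- pv_equiv track=rewrite | github.com/ksayee/programming_assignments | python/CodingExercises/WordMatchingCamelCaseNotation.py | WordMatchingCamelCaseNotation
-- ===== SOURCE A (Python) =====
-- def WordMatchingCamelCaseNotation(ary,pattern):
--
--     output_list=[]
--
--     for word in ary:
--         flg=True
--         tmp_word=word
--         for letter in pattern:
--             try:
--                 idx=word.index(letter)
--                 word=word[idx+1:]
--             except:
--                 flg=False
--         if flg==True:
--             output_list.append(tmp_word)
--     return output_list
-- ===== SOURCE B (Python) =====
-- def WordMatchingCamelCaseNotation(ary, pattern):
--     # two-pointer subsequence scan: walk each word once, advancing through pattern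
--     def is_subseq(word):
--         pi = 0
--         for ch in word:
--             if pi < len(pattern) and ch == pattern[pi]:
--                 pi += 1
--         return pi == len(pattern)
--     return [w for w in ary if is_subseq(w)]
-- ===== Notes on version B (the rewrite author's own statement) =====
-- stated objective: faster
-- what changed: Replaced the try/except .index + slice loop over the pattern (with a sticky failure flag) by a single two-pointer scan over each word advancing a pattern index, and a list comprehension instead of manual appends.
import Mathlib
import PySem

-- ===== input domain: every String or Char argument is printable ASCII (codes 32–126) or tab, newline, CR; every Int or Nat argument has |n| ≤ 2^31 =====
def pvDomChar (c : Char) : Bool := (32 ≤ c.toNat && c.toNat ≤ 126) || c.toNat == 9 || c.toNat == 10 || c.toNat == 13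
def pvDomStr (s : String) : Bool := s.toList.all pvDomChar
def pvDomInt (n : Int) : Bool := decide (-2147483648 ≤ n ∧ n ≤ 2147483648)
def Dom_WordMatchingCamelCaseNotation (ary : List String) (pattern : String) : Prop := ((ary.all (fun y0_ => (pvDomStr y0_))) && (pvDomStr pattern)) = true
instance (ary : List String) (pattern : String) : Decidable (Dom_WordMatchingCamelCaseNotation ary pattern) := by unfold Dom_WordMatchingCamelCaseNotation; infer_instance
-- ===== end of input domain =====

-- B replaces A's try/except .index+slice loop over the pattern by a single two-pointer scan of each word (idiomatic, no slice copies); return values proved equal.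


-- ===== PORT A =====
-- word.index(letter): first index of letter, none = ValueError (caught by A's except)
def pvIdx? : List Char → Char → Option Nat
  | [], _ => none
  | c :: cs, l => if c = l then some 0 else (pvIdx? cs l).map (· + 1)

-- one iteration of A's inner loop: state = (remaining word, flg)
def pvStepA : (List Char × Bool) → Char → (List Char × Bool)
  | (w, flg), letter =>
    match pvIdx? w letter with
    | some i => (w.drop (i + 1), flg)   -- word = word[idx+1:]
    | none => (w, false)                 -- except: flg = False

def WordMatchingCamelCaseNotation (ary : List String) (pattern : String) : List String :=
  ary.foldl (fun output_list word =>
    if (pattern.toList.foldl pvStepA (word.toList, true)).2 then output_list ++ [word]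
    else output_list) []

-- ===== PORT B =====
-- two-pointer scan: walk the word once, advancing through the pattern
def pvSubseq : List Char → List Char → Bool
  | [], _ => true
  | _ :: _, [] => false
  | p :: ps, c :: cs => if c = p then pvSubseq ps cs else pvSubseq (p :: ps) cs

def WordMatchingCamelCaseNotation_alt (ary : List String) (pattern : String) : List String :=
  ary.filter (fun w => pvSubseq pattern.toList w.toList)

-- ===== PRECONDITION & SPEC =====
def Spec_WordMatchingCamelCaseNotation (ary : List String) (pattern : String) (out : List String) : Prop := out = WordMatchingCamelCaseNotation_alt ary pattern
instance (ary : List String) (pattern : String) (out : List String) : Decidable (Spec_WordMatchingCamelCaseNotation ary pattern out) := by unfold Spec_WordMatchingCamelCaseNotation; infer_instance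

-- ===== CLAIM (what is proved, stated in full; the proofs are below) =====
def Claim_equal_WordMatchingCamelCaseNotation : Prop := ∀ (ary : List String) (pattern : String), Dom_WordMatchingCamelCaseNotation ary pattern → Spec_WordMatchingCamelCaseNotation ary pattern (WordMatchingCamelCaseNotation ary pattern)

-- ===== LEMMAS AND PROOFS =====

-- greedy step: matching the head of the pattern at the FIRST occurrence is what the two-pointer scan computes
theorem pvSubseq_cons_eq (l : Char) (ps w : List Char) :
    pvSubseq (l :: ps) w =
      match pvIdx? w l with
      | some i => pvSubseq ps (w.drop (i + 1))
      | none => false := by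
  induction w with
  | nil => simp [pvSubseq, pvIdx?]
  | cons c cs ih =>
    by_cases h : c = l
    · subst h; simp [pvSubseq, pvIdx?]
    · have hcl : ¬ (c = l) := h
      simp only [pvSubseq, pvIdx?, if_neg hcl, ih]
      cases hfind : pvIdx? cs l <;> simp [List.drop_succ_cons]

-- once flg is False it stays False
theorem foldA_false (p : List Char) : ∀ w : List Char,
    (p.foldl pvStepA (w, false)).2 = false := by
  induction p with
  | nil => intro w; rfl
  | cons l ps ih =>
    intro w
    simp only [List.foldl_cons, pvStepA]
    cases hfind : pvIdx? w l <;> simp [ih]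

-- A's inner loop started with flg = True computes exactly the two-pointer subsequence test
theorem foldA_eq_subseq (p : List Char) : ∀ w : List Char,
    (p.foldl pvStepA (w, true)).2 = pvSubseq p w := by
  induction p with
  | nil => intro w; simp [pvSubseq]
  | cons l ps ih =>
    intro w
    rw [pvSubseq_cons_eq]
    simp only [List.foldl_cons, pvStepA]
    cases hfind : pvIdx? w l
    · simp [foldA_false]
    · simp [ih]

-- ===== VERDICT (by name: the statement is the Claim_ definition above) =====
theorem WordMatchingCamelCaseNotation_spec : Claim_equal_WordMatchingCamelCaseNotation := by
  intro ary pattern _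
  unfold Spec_WordMatchingCamelCaseNotation WordMatchingCamelCaseNotation WordMatchingCamelCaseNotation_alt
  rw [PySem.List.foldl_append_if_eq_filter]
  simp [foldA_eq_subseq]
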